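-- pv_equiv track=rewrite | github.com/slavagarchenko/Case_14 | game_logic.py | create_pattern_grid
-- ===== SOURCE A (Python) =====
-- from typing import List, Tuple
--
-- Grid = List[List[int]]
--
-- def create_pattern_grid(rows: int, cols: int, pattern: List[Tuple[int, int]],
--                         offset_row: int = 0, offset_col: int = 0) -> Grid:
--     """
--     Create a grid with a specific pattern of live cells.
--
--     Args:
--         rows: Number of rows in new grid
--         cols: Number of columns in new grid
--         pattern: List of (row, col) coordinates for live cells
--         offset_row: Row offset to apply to pattern coordinates
--         offset_col: Column offset to apply to pattern coordinates
--
--     Returns: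
--         New grid with pattern placed at specified offset
--     """
--     grid = [[0 for _ in range(cols)] for _ in range(rows)]
--
--     for pattern_row, pattern_col in pattern:
--         new_row = pattern_row + offset_row
--         new_col = pattern_col + offset_col
--
--         if 0 <= new_row < rows and 0 <= new_col < cols:
--             grid[new_row][new_col] = 1
--
--     return grid
-- ===== SOURCE B (Python) =====
-- from typing import List, Tuple
--
-- Grid = List[List[int]]
--
-- def create_pattern_grid(rows: int, cols: int, pattern: List[Tuple[int, int]],
--                         offset_row: int = 0, offset_col: int = 0) -> Grid:
--     live = {(pr + offset_row, pc + offset_col) for pr, pc in pattern}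
--     return [[1 if (r, c) in live else 0 for c in range(cols)] for r in range(rows)]
-- ===== Notes on version B (the rewrite author's own statement) =====
-- stated objective: idiomatic
-- what changed: Replaces the scatter loop (allocate zero grid, iterate pattern, write in-range cells) with a gather pass: precompute the set of offset live coordinates once, then build the grid in one comprehension testing membership per cell; bounds checks disappear because only in-range (r,c) are generated.
import Mathlib
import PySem

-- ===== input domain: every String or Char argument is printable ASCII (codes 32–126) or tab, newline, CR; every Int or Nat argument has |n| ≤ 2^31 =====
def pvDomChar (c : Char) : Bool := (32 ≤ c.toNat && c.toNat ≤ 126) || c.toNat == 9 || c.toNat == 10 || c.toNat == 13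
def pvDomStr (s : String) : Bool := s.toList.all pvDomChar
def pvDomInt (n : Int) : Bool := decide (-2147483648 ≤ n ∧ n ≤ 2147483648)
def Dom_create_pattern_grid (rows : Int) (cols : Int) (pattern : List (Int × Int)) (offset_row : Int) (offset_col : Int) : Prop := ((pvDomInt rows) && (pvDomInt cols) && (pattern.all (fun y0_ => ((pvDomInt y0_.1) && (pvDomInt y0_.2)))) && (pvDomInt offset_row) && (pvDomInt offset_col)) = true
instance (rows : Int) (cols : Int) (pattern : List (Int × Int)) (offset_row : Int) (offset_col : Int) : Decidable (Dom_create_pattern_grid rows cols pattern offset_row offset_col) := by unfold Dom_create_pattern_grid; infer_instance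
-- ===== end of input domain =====

-- B replaces A's scatter loop (zero grid, then write each in-range offset pattern cell)
-- by a gather pass: a set of offset live coordinates built once, then one membership
-- test per grid cell (objective: idiomatic; same asymptotic cost).

-- ===== PORT A =====
-- scatter: build zero grid, then for each pattern cell write 1 if the offset cell is in range
def create_pattern_grid (rows : Int) (cols : Int) (pattern : List (Int × Int)) (offset_row : Int) (offset_col : Int) : List (List Int) :=
  let grid : List (List Int) :=
    (List.range rows.toNat).map (fun _ => (List.range cols.toNat).map (fun _ => (0 : Int)))
  pattern.foldl (fun g p =>
    let new_row := p.1 + offset_row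
    let new_col := p.2 + offset_col
    if 0 ≤ new_row ∧ new_row < rows ∧ 0 ≤ new_col ∧ new_col < cols then
      g.set new_row.toNat ((g.getD new_row.toNat []).set new_col.toNat 1)
    else g) grid

-- ===== PORT B =====
-- gather: set of offset live coordinates, then one membership test per cell
def create_pattern_grid_alt (rows : Int) (cols : Int) (pattern : List (Int × Int)) (offset_row : Int) (offset_col : Int) : List (List Int) :=
  let live : PySem.Set (Int × Int) :=
    PySem.Set.ofList (pattern.map (fun p => (p.1 + offset_row, p.2 + offset_col)))
  (List.range rows.toNat).map (fun (r : Nat) =>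
    (List.range cols.toNat).map (fun (c : Nat) =>
      if ((r : Int), (c : Int)) ∈ live then (1 : Int) else 0))

-- ===== PRECONDITION & SPEC =====
def Spec_create_pattern_grid (rows : Int) (cols : Int) (pattern : List (Int × Int)) (offset_row : Int) (offset_col : Int) (out : List (List Int)) : Prop := out = create_pattern_grid_alt rows cols pattern offset_row offset_col
instance (rows : Int) (cols : Int) (pattern : List (Int × Int)) (offset_row : Int) (offset_col : Int) (out : List (List Int)) : Decidable (Spec_create_pattern_grid rows cols pattern offset_row offset_col out) := by unfold Spec_create_pattern_grid; infer_instance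

-- ===== CLAIM (what is proved, stated in full; the proofs are below) =====
def Claim_equal_create_pattern_grid : Prop := ∀ (rows : Int) (cols : Int) (pattern : List (Int × Int)) (offset_row : Int) (offset_col : Int), Dom_create_pattern_grid rows cols pattern offset_row offset_col → Spec_create_pattern_grid rows cols pattern offset_row offset_col (create_pattern_grid rows cols pattern offset_row offset_col)

-- ===== LEMMAS AND PROOFS =====

/-- Grid given pointwise by a function. -/
def pvGridOf (R C : Nat) (f : Nat → Nat → Int) : List (List Int) :=
  (List.range R).map (fun r => (List.range C).map (fun c => f r c))

theorem pvGridOf_congr {R C : Nat} {f g : Nat → Nat → Int}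
    (h : ∀ r < R, ∀ c < C, f r c = g r c) : pvGridOf R C f = pvGridOf R C g := by
  unfold pvGridOf
  refine List.map_congr_left (fun r hr => ?_)
  refine List.map_congr_left (fun c hc => ?_)
  exact h r (List.mem_range.mp hr) c (List.mem_range.mp hc)

theorem pvGridOf_set {R C : Nat} {f : Nat → Nat → Int} {i j : Nat} (hi : i < R) (hj : j < C) (v : Int) :
    (pvGridOf R C f).set i (((pvGridOf R C f).getD i []).set j v)
      = pvGridOf R C (fun r c => if r = i ∧ c = j then v else f r c) := by
  have hget : (pvGridOf R C f).getD i [] = (List.range C).map (fun c => f i c) := by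
    rw [List.getD_eq_getElem _ _ (by simp [pvGridOf]; omega : i < (pvGridOf R C f).length)]
    simp [pvGridOf]
  rw [hget]
  apply List.ext_getElem
  · simp [pvGridOf]
  · intro r hr hr'
    have hrR : r < R := by simpa [pvGridOf] using hr'
    by_cases h : r = i
    · subst h
      rw [List.getElem_set_self (by simpa [pvGridOf] using hrR)]
      apply List.ext_getElem
      · simp [pvGridOf]
      · intro c hc hc'
        have hcC : c < C := by simpa using hc
        by_cases h2 : c = j
        · subst h2
          rw [List.getElem_set_self (by simpa using hj)]
          simp [pvGridOf]
        · rw [List.getElem_set_ne (by omega)]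
          simp [pvGridOf, h2]
    · rw [List.getElem_set_ne (by omega)]
      simp [pvGridOf, h]

/-- Invariant of A's scatter fold: folding the pattern over a pointwise grid
    overwrites exactly the cells hit by the (offset) pattern with 1. -/
theorem pv_foldl_scatter (rows cols offset_row offset_col : Int) :
    ∀ (l : List (Int × Int)) (f : Nat → Nat → Int),
      l.foldl (fun g p =>
          let new_row := p.1 + offset_row
          let new_col := p.2 + offset_col
          if 0 ≤ new_row ∧ new_row < rows ∧ 0 ≤ new_col ∧ new_col < cols then
            g.set new_row.toNat ((g.getD new_row.toNat []).set new_col.toNat 1)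
          else g) (pvGridOf rows.toNat cols.toNat f)
      = pvGridOf rows.toNat cols.toNat (fun r c =>
          if ∃ p ∈ l, p.1 + offset_row = (r : Int) ∧ p.2 + offset_col = (c : Int) then 1 else f r c) := by
  intro l
  induction l with
  | nil =>
    intro f
    simp only [List.foldl_nil]
    apply pvGridOf_congr
    intro r _ c _
    simp
  | cons p l ih =>
    intro f
    simp only [List.foldl_cons]
    by_cases hin : 0 ≤ p.1 + offset_row ∧ p.1 + offset_row < rows ∧ 0 ≤ p.2 + offset_col ∧ p.2 + offset_col < cols
    · have hrow : (p.1 + offset_row).toNat < rows.toNat := by omega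
      have hcol : (p.2 + offset_col).toNat < cols.toNat := by omega
      simp only [if_pos hin]
      rw [pvGridOf_set hrow hcol 1, ih]
      apply pvGridOf_congr
      intro r hr c hc
      by_cases hhit : ∃ q ∈ l, q.1 + offset_row = (r : Int) ∧ q.2 + offset_col = (c : Int)
      · have : ∃ q ∈ p :: l, q.1 + offset_row = (r : Int) ∧ q.2 + offset_col = (c : Int) := by
          obtain ⟨q, hq, hq2⟩ := hhit
          exact ⟨q, List.mem_cons_of_mem _ hq, hq2⟩
        rw [if_pos hhit, if_pos this]
      · rw [if_neg hhit]
        by_cases hp : r = (p.1 + offset_row).toNat ∧ c = (p.2 + offset_col).toNat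
        · have : ∃ q ∈ p :: l, q.1 + offset_row = (r : Int) ∧ q.2 + offset_col = (c : Int) := by
            refine ⟨p, List.mem_cons_self, ?_, ?_⟩ <;> omega
          rw [if_pos hp, if_pos this]
        · have : ¬ ∃ q ∈ p :: l, q.1 + offset_row = (r : Int) ∧ q.2 + offset_col = (c : Int) := by
            rintro ⟨q, hq, h1, h2⟩
            rcases List.mem_cons.mp hq with rfl | hq'
            · exact hp ⟨by omega, by omega⟩
            · exact hhit ⟨q, hq', h1, h2⟩
          rw [if_neg hp, if_neg this]
    · simp only [if_neg hin]
      rw [ih]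
      apply pvGridOf_congr
      intro r hr c hc
      have hr' : (r : Int) < rows := by omega
      have hc' : (c : Int) < cols := by omega
      by_cases hhit : ∃ q ∈ l, q.1 + offset_row = (r : Int) ∧ q.2 + offset_col = (c : Int)
      · obtain ⟨q, hq, hq2⟩ := hhit
        rw [if_pos ⟨q, hq, hq2⟩, if_pos ⟨q, List.mem_cons_of_mem _ hq, hq2⟩]
      · have : ¬ ∃ q ∈ p :: l, q.1 + offset_row = (r : Int) ∧ q.2 + offset_col = (c : Int) := by
          rintro ⟨q, hq, h1, h2⟩
          rcases List.mem_cons.mp hq with rfl | hq'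
          · apply hin
            refine ⟨by omega, by omega, by omega, by omega⟩
          · exact hhit ⟨q, hq', h1, h2⟩
        rw [if_neg hhit, if_neg this]

-- ===== VERDICT (by name: the statement is the Claim_ definition above) =====
theorem create_pattern_grid_spec : Claim_equal_create_pattern_grid := by
  intro rows cols pattern offset_row offset_col _
  unfold Spec_create_pattern_grid create_pattern_grid create_pattern_grid_alt
  have hA := pv_foldl_scatter rows cols offset_row offset_col pattern (fun _ _ => 0)
  simp only [] at hA ⊢
  rw [show ((List.range rows.toNat).map (fun _ => (List.range cols.toNat).map (fun _ => (0 : Int))))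
        = pvGridOf rows.toNat cols.toNat (fun _ _ => 0) from rfl]
  rw [hA]
  show pvGridOf rows.toNat cols.toNat (fun r c =>
        if ∃ p ∈ pattern, p.1 + offset_row = (r : Int) ∧ p.2 + offset_col = (c : Int) then 1 else 0)
     = pvGridOf rows.toNat cols.toNat (fun r c =>
        if ((r : Int), (c : Int)) ∈ PySem.Set.ofList (pattern.map (fun p => (p.1 + offset_row, p.2 + offset_col))) then 1 else 0)
  apply pvGridOf_congr
  intro r _ c _
  congr 1
  simp only [eq_iff_iff]
  rw [PySem.Set.mem_ofList, List.mem_map]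
  constructor
  · rintro ⟨p, hp, h1, h2⟩
    exact ⟨p, hp, by rw [h1, h2]⟩
  · rintro ⟨p, hp, h⟩
    rw [Prod.mk.injEq] at h
    exact ⟨p, hp, h.1, h.2⟩
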